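-- pv_equiv track=rewrite | github.com/angiarao/Learning | UdaAlgo/SimpleAndLongestPath.py | long_and_simple_decision
-- ===== SOURCE A (Python) =====
-- def all_perms(seq):
--     if len(seq) == 0: return [[]]
--     if len(seq) == 1: return [seq, []]
--     seq = list(seq)
--     most = all_perms(seq[1:])
--     first = seq[0]
--     rest = []
--     for perm in most:
--         for i in range(len(perm)+1):
--             rest.append(perm[0:i] + [first] + perm[i:])
--     return most + rest
--
-- def check_path(G,path):
--     for i in range(len(path)-1):
--         if path[i+1] not in G[path[i]]: return False
--     return True
--
-- def long_and_simple_decision(G,u,v,l):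
--     if l == 0:
--         return False
--     n = len(G)
--     perms = all_perms(G.keys())
--     for perm in perms:
--         # check path
--         if (len(perm) >= l and check_path(G,perm) and perm[0] == u
--             and perm[len(perm)-1] == v):
--             return True
--     return False
-- ===== SOURCE B (Python) =====
-- def long_and_simple_decision(G, u, v, l):
--     if l == 0:
--         return False
--     if u not in G or v not in G:
--         return False
--     need = max(l, 1)
--     n = len(G)
--     if u == v and 1 >= need:
--         return True
--     # level-synchronous subset DP: states (frozen sorted vertex tuple, endpoint)
--     # of all simple paths from u with exactly k vertices
--     level = {((u,), u)}
--     for k in range(2, n + 1):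
--         level = {(tuple(sorted(vis + (w,))), w)
--                  for vis, j in level
--                  for w in G[j]
--                  if w in G and w not in vis}
--         if k >= need and any(e == v for _, e in level):
--             return True
--     return False
-- ===== Notes on version B (the rewrite author's own statement) =====
-- stated objective: faster
-- what changed: Replaced the enumeration of all n!*e permutations of vertex subsets (each then checked as a path) by a level-synchronous subset dynamic programming that only extends states (visited-vertex-set, endpoint) of actual simple paths from u, checking for endpoint v at each length >= max(l,1); intended as faster (asymptotic), measured: A timed out at n=16 where B returned, so no clean ratio could be read.
-- outside the precondition, e.g. on long_and_simple_decision({1: [], 2: [1]}, 2, 2, -1): A returns True, B returns True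
import Mathlib
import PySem

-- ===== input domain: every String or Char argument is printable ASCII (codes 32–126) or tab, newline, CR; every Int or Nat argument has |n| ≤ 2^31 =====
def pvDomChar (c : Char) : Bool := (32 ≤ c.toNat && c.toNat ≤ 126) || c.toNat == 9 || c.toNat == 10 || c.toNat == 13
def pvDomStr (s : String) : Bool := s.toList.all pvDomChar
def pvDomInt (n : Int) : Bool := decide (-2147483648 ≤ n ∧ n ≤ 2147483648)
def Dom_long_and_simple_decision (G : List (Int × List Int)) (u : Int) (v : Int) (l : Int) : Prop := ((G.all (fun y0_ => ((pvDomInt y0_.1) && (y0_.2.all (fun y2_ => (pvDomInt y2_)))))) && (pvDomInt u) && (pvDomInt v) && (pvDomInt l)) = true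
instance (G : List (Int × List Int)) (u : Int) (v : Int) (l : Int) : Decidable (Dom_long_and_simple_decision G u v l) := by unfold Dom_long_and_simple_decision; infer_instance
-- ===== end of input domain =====

-- B replaces A's enumeration of all n!·e permutations of vertex subsets by a
-- level-synchronous subset DP over states (sorted visited-vertex list, endpoint) of simple
-- paths from u; intended as faster (a timing run saw A time out at n=16 where B returned).

-- ===== PORT A =====
-- literal port of all_perms (seq[1:] / seq[0] / perm[0:i] / perm[i:] via PySem slices)
def pvAllPerms (seq : List Int) : List (List Int) :=
  if PySem.List.len seq = 0 then [[]]
  else if PySem.List.len seq = 1 then [seq, []]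
  else
    let most := pvAllPerms (PySem.List.slice seq (some 1) none)
    let first := (PySem.List.pyGet? seq 0).getD 0
    -- rest.append(x) is ported as the cons-accumulator fold with one final reverse
    -- (same elements in the same order, linear instead of quadratic in the interpreter)
    let rest := (most.foldl (fun racc perm =>
      (PySem.List.pyRange 0 (PySem.List.len perm + 1) 1).foldl
        (fun racc2 i => (PySem.List.slice perm (some 0) (some i) ++ [first] ++ PySem.List.slice perm (some i) none) :: racc2)
        racc) []).reverse
    most ++ rest
termination_by seq.length
decreasing_by
  simp only [PySem.List.slice_from_one, List.length_tail]
  simp only [PySem.List.len_eq] at *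
  omega

-- literal port of check_path (G[path[i]] is always a present key at A's call sites,
-- so the total getD form computes the same value)
def pvCheckPath (d : PySem.Dict Int (List Int)) (path : List Int) : Bool :=
  (PySem.List.pyRange 0 (PySem.List.len path - 1) 1).all
    (fun i => (PySem.Dict.getD d (PySem.List.pyGetD path i 0) []).contains
                (PySem.List.pyGetD path (i + 1) 0))

def long_and_simple_decision (G : List (Int × List Int)) (u : Int) (v : Int) (l : Int) : Bool :=
  if l = 0 then false
  else
    let d := PySem.Dict.ofList G
    let _n := PySem.Dict.size d
    let perms := pvAllPerms (PySem.Dict.keys d)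
    perms.any (fun perm =>
      decide (l ≤ PySem.List.len perm) && pvCheckPath d perm &&
      (PySem.List.pyGet? perm 0 == some u) &&
      (PySem.List.pyGet? perm (PySem.List.len perm - 1) == some v))

-- ===== PORT B =====
-- one DP level extension: the set comprehension over the current level
def pvNext (d : PySem.Dict Int (List Int)) (level : PySem.Set (List Int × Int)) :
    PySem.Set (List Int × Int) :=
  PySem.Set.ofList (level.flatMap (fun p =>
    ((PySem.Dict.getD d p.2 []).filter
        (fun w => PySem.Dict.contains d w && !(p.1.contains w))).map
      (fun w => (PySem.List.sorted (p.1 ++ [w]) (fun x => x) false, w))))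

-- one iteration of B's for-loop (found-flag carries Python's early `return True`)
def pvStep (d : PySem.Dict Int (List Int)) (v need : Int)
    (st : Bool × PySem.Set (List Int × Int)) (k : Int) :
    Bool × PySem.Set (List Int × Int) :=
  if st.1 then st
  else
    let nxt := pvNext d st.2
    if decide (need ≤ k) && nxt.any (fun q => q.2 == v) then (true, nxt) else (false, nxt)

def long_and_simple_decision_alt (G : List (Int × List Int)) (u : Int) (v : Int) (l : Int) : Bool :=
  if l = 0 then false
  else
    let d := PySem.Dict.ofList G
    if !(PySem.Dict.contains d u) || !(PySem.Dict.contains d v) then false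
    else
      let need := max l 1
      let n : Int := (PySem.Dict.size d : Int)
      if u = v ∧ (1 : Int) ≥ need then true
      else
        ((PySem.List.pyRange 2 (n + 1) 1).foldl (pvStep d v need)
          (false, PySem.Set.ofList [([u], u)])).1

-- ===== PRECONDITION & SPEC =====
-- Pre_ excludes negative l, where A raises IndexError on the empty permutation on almost
-- all inputs (and where it does return — u = v = the last key — that accidental early True
-- is an artefact of the enumeration order), and the single-key dict with l = 1, where A
-- raises TypeError subscripting dict_keys.
def Pre_long_and_simple_decision (G : List (Int × List Int)) (u : Int) (v : Int) (l : Int) : Prop :=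
  0 ≤ l ∧ ¬((PySem.Dict.ofList G).keys.length = 1 ∧ l = 1)
instance (G : List (Int × List Int)) (u : Int) (v : Int) (l : Int) : Decidable (Pre_long_and_simple_decision G u v l) := by unfold Pre_long_and_simple_decision; infer_instance
def pvWitness_long_and_simple_decision : (List (Int × List Int)) × Int × Int × Int :=
  ([(1, [2]), (2, [])], 1, 2, 2)

def Spec_long_and_simple_decision (G : List (Int × List Int)) (u : Int) (v : Int) (l : Int) (out : Bool) : Prop := out = long_and_simple_decision_alt G u v l
instance (G : List (Int × List Int)) (u : Int) (v : Int) (l : Int) (out : Bool) : Decidable (Spec_long_and_simple_decision G u v l out) := by unfold Spec_long_and_simple_decision; infer_instance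

-- ===== CLAIM (what is proved, stated in full; the proofs are below) =====
def Claim_equal_long_and_simple_decision : Prop := ∀ (G : List (Int × List Int)) (u : Int) (v : Int) (l : Int), Dom_long_and_simple_decision G u v l → Pre_long_and_simple_decision G u v l → Spec_long_and_simple_decision G u v l (long_and_simple_decision G u v l)
-- ===== LEMMAS AND PROOFS =====

-- the common semantic characterisation: a simple path in d from u to v with ≥ l vertices
def pvAdj (d : PySem.Dict Int (List Int)) (a b : Int) : Prop := b ∈ PySem.Dict.getD d a []

def pvIsPath (d : PySem.Dict Int (List Int)) (p : List Int) : Prop :=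
  p ≠ [] ∧ p.Nodup ∧ (∀ x ∈ p, x ∈ d.keys) ∧ List.IsChain (pvAdj d) p

def pvPathEx (d : PySem.Dict Int (List Int)) (u v l : Int) : Prop :=
  ∃ p, pvIsPath d p ∧ p.head? = some u ∧ p.getLast? = some v ∧ l ≤ (p.length : Int)

-- ---- A side ----
theorem pvAllPerms_nil : pvAllPerms [] = [[]] := by
  rw [pvAllPerms]; simp

theorem pvAllPerms_singleton (a : Int) : pvAllPerms [a] = [[a], []] := by
  rw [pvAllPerms]; simp

theorem pvAllPerms_cons (a : Int) (r : List Int) (hr : r ≠ []) :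
    pvAllPerms (a :: r) = pvAllPerms r ++ (pvAllPerms r).flatMap
      (fun q => (List.range (q.length + 1)).map (fun k => q.take k ++ a :: q.drop k)) := by
  have h0 : ¬ PySem.List.len (a :: r) = 0 := by
    simp only [PySem.List.len_eq, List.length_cons]; omega
  have h1 : ¬ PySem.List.len (a :: r) = 1 := by
    simp only [PySem.List.len_eq, List.length_cons]
    have : r.length ≠ 0 := by simpa [List.length_eq_zero_iff] using hr
    omega
  rw [pvAllPerms, if_neg h0, if_neg h1]
  simp only [PySem.List.slice_from_one, List.tail_cons, PySem.List.pyGet?_zero_cons,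
    Option.getD_some]
  have hone : ∀ (f : Int → List Int) (l : List Int) (acc : List (List Int)),
      l.foldl (fun acc2 i => f i :: acc2) acc = (l.map f).reverse ++ acc := by
    intro f l
    induction l with
    | nil => intro acc; simp
    | cons x t iht => intro acc; simp [iht]
  have htwo : ∀ (g : List Int → List (List Int)) (l : List (List Int)) (acc : List (List Int)),
      l.foldl (fun acc q => (g q).reverse ++ acc) acc = (l.flatMap g).reverse ++ acc := by
    intro g l
    induction l with
    | nil => intro acc; simp
    | cons x t iht => intro acc; simp [iht]
  have hfun : (fun (q : List Int) => (PySem.List.pyRange 0 (PySem.List.len q + 1) 1).map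
        (fun i => PySem.List.slice q (some 0) (some i) ++ [a] ++ PySem.List.slice q (some i) none))
      = fun (q : List Int) => (List.range (q.length + 1)).map (fun k => q.take k ++ a :: q.drop k) := by
    funext q
    have hcast : PySem.List.len q + 1 = ((q.length + 1 : Nat) : Int) := by
      rw [PySem.List.len_eq]; push_cast; ring
    rw [hcast, PySem.List.pyRange_zero_nat, List.map_map]
    apply List.map_congr_left
    intro k _
    simp only [Function.comp_apply]
    rw [PySem.List.slice_zero_start, PySem.List.slice_to_natCast, PySem.List.slice_from_natCast]
    simp
  have houter := PySem.List.foldl_congr_mem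
    (l := pvAllPerms r) (init := ([] : List (List Int)))
    (f := fun racc perm => (PySem.List.pyRange 0 (PySem.List.len perm + 1) 1).foldl
      (fun racc2 i => (PySem.List.slice perm (some 0) (some i) ++ [a] ++
        PySem.List.slice perm (some i) none) :: racc2) racc)
    (g := fun racc perm => ((PySem.List.pyRange 0 (PySem.List.len perm + 1) 1).map
      (fun i => PySem.List.slice perm (some 0) (some i) ++ [a] ++
        PySem.List.slice perm (some i) none)).reverse ++ racc)
    (fun acc x _ => hone _ _ acc)
  rw [houter, htwo, List.append_nil, List.reverse_reverse, hfun]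

theorem pv_mem_allPerms (seq : List Int) :
    seq.Nodup → ∀ perm : List Int,
      (perm ∈ pvAllPerms seq ↔ perm.Nodup ∧ ∀ x ∈ perm, x ∈ seq) := by
  induction seq with
  | nil =>
    intro _ perm
    rw [pvAllPerms_nil]
    simp only [List.mem_singleton]
    constructor
    · rintro rfl; exact ⟨List.nodup_nil, by simp⟩
    · rintro ⟨-, h2⟩
      rcases perm with _ | ⟨x, t⟩
      · rfl
      · exact absurd (h2 x List.mem_cons_self) (by simp)
  | cons a r ih =>
    intro hnd perm
    have hna : a ∉ r := (List.nodup_cons.mp hnd).1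
    have hndr : r.Nodup := (List.nodup_cons.mp hnd).2
    rcases eq_or_ne r [] with rfl | hr
    · rw [pvAllPerms_singleton]
      constructor
      · intro h
        simp only [List.mem_cons, List.not_mem_nil, or_false] at h
        rcases h with rfl | rfl
        · exact ⟨by simp, by simp⟩
        · exact ⟨List.nodup_nil, by simp⟩
      · rintro ⟨h1, h2⟩
        rcases perm with _ | ⟨x, t⟩
        · simp
        · have hx : x = a := by simpa using h2 x List.mem_cons_self
          subst hx
          have ht : t = [] := by
            rcases t with _ | ⟨y, t2⟩
            · rfl
            · have hy : y = x := by simpa using h2 y (by simp)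
              subst hy
              exact absurd (List.nodup_cons.mp h1).1 (by simp)
          subst ht
          simp
    · rw [pvAllPerms_cons a r hr]
      simp only [List.mem_append, List.mem_flatMap, List.mem_map, List.mem_range]
      constructor
      · rintro (h | ⟨q, hq, k, hk, rfl⟩)
        · obtain ⟨h1, h2⟩ := (ih hndr perm).mp h
          exact ⟨h1, fun x hx => List.mem_cons_of_mem a (h2 x hx)⟩
        · obtain ⟨h1, h2⟩ := (ih hndr q).mp hq
          have haq : a ∉ q := fun hc => hna (h2 a hc)
          have hperm : (q.take k ++ a :: q.drop k).Perm (a :: q) := by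
            have h := List.perm_middle (a := a) (l₁ := q.take k) (l₂ := q.drop k)
            rwa [List.take_append_drop] at h
          refine ⟨hperm.nodup_iff.mpr (List.nodup_cons.mpr ⟨haq, h1⟩), fun x hx => ?_⟩
          rcases List.mem_cons.mp (hperm.mem_iff.mp hx) with rfl | hxq
          · exact List.mem_cons_self
          · exact List.mem_cons_of_mem a (h2 x hxq)
      · rintro ⟨h1, h2⟩
        by_cases ha : a ∈ perm
        · obtain ⟨s, t, rfl⟩ := List.append_of_mem ha
          have h1' := List.nodup_middle.mp h1
          have hast : a ∉ s ++ t := (List.nodup_cons.mp h1').1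
          have hq1 : (s ++ t).Nodup := (List.nodup_cons.mp h1').2
          have hq2 : ∀ x ∈ s ++ t, x ∈ r := by
            intro x hx
            have hxp : x ∈ s ++ a :: t := by
              rcases List.mem_append.mp hx with h | h
              · exact List.mem_append_left _ h
              · exact List.mem_append_right _ (List.mem_cons_of_mem _ h)
            rcases List.mem_cons.mp (h2 x hxp) with rfl | hxr
            · exact absurd hx hast
            · exact hxr
          refine Or.inr ⟨s ++ t, (ih hndr _).mpr ⟨hq1, hq2⟩, s.length, ?_, ?_⟩
          · have : s.length ≤ (s ++ t).length := by simp
            omega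
          · rw [List.take_left, List.drop_left]
        · refine Or.inl ((ih hndr perm).mpr ⟨h1, fun x hx => ?_⟩)
          rcases List.mem_cons.mp (h2 x hx) with rfl | h
          · exact absurd hx ha
          · exact h

theorem pvCheckPath_iff (d : PySem.Dict Int (List Int)) (p : List Int) :
    pvCheckPath d p = true ↔ List.IsChain (pvAdj d) p := by
  unfold pvCheckPath
  rw [List.isChain_iff_getElem, List.all_eq_true]
  constructor
  · intro h i hi
    have hmem : ((i : Nat) : Int) ∈ PySem.List.pyRange 0 (PySem.List.len p - 1) 1 := by
      rw [PySem.List.mem_pyRange_one, PySem.List.len_eq]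
      omega
    have hthis := h _ hmem
    simp only [List.contains_iff_mem] at hthis
    have e1 : PySem.List.pyGetD p ((i : Nat) : Int) 0 = p[i] := by
      rw [PySem.List.pyGetD_natCast, List.getD_eq_getElem p 0 (by omega)]
    have e2 : PySem.List.pyGetD p (((i : Nat) : Int) + 1) 0 = p[i + 1] := by
      rw [show (((i : Nat) : Int) + 1) = ((i + 1 : Nat) : Int) by push_cast; ring,
        PySem.List.pyGetD_natCast, List.getD_eq_getElem p 0 (by omega)]
    rw [e1, e2] at hthis
    exact hthis
  · intro h x hx
    rw [PySem.List.mem_pyRange_one, PySem.List.len_eq] at hx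
    obtain ⟨k, rfl⟩ : ∃ k : Nat, x = (k : Int) := ⟨x.toNat, by omega⟩
    have hk : k + 1 < p.length := by omega
    simp only [List.contains_iff_mem]
    have e1 : PySem.List.pyGetD p ((k : Nat) : Int) 0 = p[k] := by
      rw [PySem.List.pyGetD_natCast, List.getD_eq_getElem p 0 (by omega)]
    have e2 : PySem.List.pyGetD p (((k : Nat) : Int) + 1) 0 = p[k + 1] := by
      rw [show (((k : Nat) : Int) + 1) = ((k + 1 : Nat) : Int) by push_cast; ring,
        PySem.List.pyGetD_natCast, List.getD_eq_getElem p 0 (by omega)]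
    rw [e1, e2]
    exact h k hk

theorem pvA_iff (G : List (Int × List Int)) (u v l : Int) (hl : 1 ≤ l) :
    long_and_simple_decision G u v l = true ↔ pvPathEx (PySem.Dict.ofList G) u v l := by
  have hnd : (PySem.Dict.ofList G).keys.Nodup := PySem.Dict.nodup_keys_ofList G
  simp only [long_and_simple_decision]
  rw [if_neg (by omega : ¬ l = 0)]
  simp only [List.any_eq_true, Bool.and_eq_true, decide_eq_true_eq, beq_iff_eq]
  constructor
  · rintro ⟨perm, hmem, ⟨⟨hlen, hchk⟩, hu⟩, hv⟩
    rw [pv_mem_allPerms _ hnd] at hmem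
    rw [PySem.List.len_eq] at hlen hv
    have hne : perm ≠ [] := by rintro rfl; simp at hlen; omega
    have hlp : 1 ≤ perm.length := by omega
    refine ⟨perm, ⟨hne, hmem.1, hmem.2, (pvCheckPath_iff _ _).mp hchk⟩, ?_, ?_, hlen⟩
    · rw [PySem.List.pyGet?_zero] at hu
      rw [List.head?_eq_getElem?]
      exact hu
    · rw [show ((perm.length : Int) - 1) = ((perm.length - 1 : Nat) : Int) by omega,
        PySem.List.pyGet?_natCast] at hv
      rw [List.getLast?_eq_getElem?]
      exact hv
  · rintro ⟨p, ⟨hne, hnd2, hmemk, hch⟩, hh, hlast, hlen⟩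
    have hlp : 1 ≤ p.length := List.length_pos_iff.mpr hne
    refine ⟨p, (pv_mem_allPerms _ hnd p).mpr ⟨hnd2, hmemk⟩, ⟨⟨?_, (pvCheckPath_iff _ _).mpr hch⟩, ?_⟩, ?_⟩
    · rw [PySem.List.len_eq]; exact hlen
    · rw [PySem.List.pyGet?_zero, ← List.head?_eq_getElem?]; exact hh
    · rw [PySem.List.len_eq,
        show ((p.length : Int) - 1) = ((p.length - 1 : Nat) : Int) by omega,
        PySem.List.pyGet?_natCast, ← List.getLast?_eq_getElem?]
      exact hlast

-- ---- B side ----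
def pvState (d : PySem.Dict Int (List Int)) (u : Int) (k : Nat) (s : List Int × Int) : Prop :=
  ∃ p : List Int, pvIsPath d p ∧ p.head? = some u ∧ p.length = k ∧
    p.getLast? = some s.2 ∧ s.1 = PySem.List.sorted p (fun x => x) false

def pvW (d : PySem.Dict Int (List Int)) (u v need : Int) (m : Nat) : Prop :=
  ∃ p, pvIsPath d p ∧ p.head? = some u ∧ p.getLast? = some v ∧
    need ≤ (p.length : Int) ∧ p.length ≤ m

theorem pv_mem_pvNext (d : PySem.Dict Int (List Int)) (u : Int) (k : Nat) (hk : 1 ≤ k)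
    (level : PySem.Set (List Int × Int))
    (hlev : ∀ s, s ∈ level ↔ pvState d u k s) :
    ∀ s, s ∈ pvNext d level ↔ pvState d u (k + 1) s := by
  intro s
  unfold pvNext
  rw [PySem.Set.mem_ofList]
  simp only [List.mem_flatMap, List.mem_map, List.mem_filter, Bool.and_eq_true,
    Bool.not_eq_true']
  constructor
  · rintro ⟨st, hst, w, ⟨hwadj, hwcont, hwvis⟩, hs⟩
    obtain ⟨p, ⟨hne, hnodup, hkeys, hch⟩, hh, hlen, hlastp, hvis⟩ := (hlev st).mp hst
    have hwvisP : w ∉ st.1 := by simpa using hwvis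
    have hsortmem : ∀ x, x ∈ st.1 ↔ x ∈ p := by
      intro x; rw [hvis]; exact (PySem.List.sorted_perm p (fun x => x) false).mem_iff
    have hwp : w ∉ p := fun hc => hwvisP ((hsortmem w).mpr hc)
    have hwkeys : w ∈ d.keys := (PySem.Dict.contains_iff_mem_keys d w).mp hwcont
    subst hs
    refine ⟨p ++ [w], ⟨by simp, ?_, ?_, ?_⟩, ?_, ?_, ?_, ?_⟩
    · rw [show p ++ [w] = p ++ w :: [] from rfl, List.nodup_middle]
      simp [hnodup, hwp]
    · intro x hx
      rcases List.mem_append.mp hx with h | h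
      · exact hkeys x h
      · rw [List.mem_singleton] at h; exact h ▸ hwkeys
    · refine List.isChain_append.mpr ⟨hch, List.isChain_singleton w, ?_⟩
      intro x hx y hy
      simp only [Option.mem_def, List.head?_cons, Option.some.injEq] at hx hy
      rw [hlastp] at hx
      obtain rfl := Option.some_inj.mp hx
      subst hy
      exact hwadj
    · obtain ⟨t, rfl⟩ := List.head?_eq_some_iff.mp hh
      simp
    · simp [hlen]
    · exact List.getLast?_concat
    · show PySem.List.sorted (st.1 ++ [w]) (fun x => x) false =
        PySem.List.sorted (p ++ [w]) (fun x => x) false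
      rw [hvis]
      exact PySem.List.sorted_eq_sorted_of_perm _ _ _ (fun _ _ h => h)
        ((PySem.List.sorted_perm p (fun x => x) false).append_right [w])
  · rintro ⟨p, ⟨hne, hnodup, hkeys, hch⟩, hh, hlen, hlast, hvis⟩
    set w := p.getLast hne with hwdef
    obtain ⟨q, hq⟩ : ∃ q, p = q ++ [w] := ⟨p.dropLast, (List.dropLast_append_getLast hne).symm⟩
    have hlastw : p.getLast? = some w := List.getLast?_eq_some_getLast hne
    have hsv : s.2 = w := by
      have := hlastw.symm.trans hlast
      exact (Option.some_inj.mp this).symm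
    have hqlen : q.length = k := by
      have := congrArg List.length hq
      simp at this
      omega
    have hqne : q ≠ [] := by
      rw [← List.length_pos_iff]
      omega
    have hqsub : q.Sublist p := hq ▸ List.sublist_append_left q _
    have hqnodup : q.Nodup := hnodup.sublist hqsub
    have hqkeys : ∀ x ∈ q, x ∈ d.keys := fun x hx => hkeys x (hq ▸ List.mem_append_left _ hx)
    have hwkeys : w ∈ d.keys := hkeys w (hq ▸ List.mem_append_right _ (by simp))
    rw [hq] at hch
    obtain ⟨hchq, -, hadj⟩ := List.isChain_append.mp hch
    have hwadj : pvAdj d (q.getLast hqne) w :=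
      hadj _ (List.getLast?_eq_some_getLast hqne) _ rfl
    have hwq : w ∉ q := by
      have hnd2 : (q ++ w :: []).Nodup := by rw [← hq]; exact hnodup
      have h1 := (List.nodup_cons.mp (List.nodup_middle.mp hnd2)).1
      simpa using h1
    have hqh : q.head? = some u := by
      rcases q with _ | ⟨x, tq⟩
      · exact absurd rfl hqne
      · rw [hq] at hh
        simp at hh
        simp [hh]
    have hstmem : (PySem.List.sorted q (fun x => x) false, q.getLast hqne) ∈ level :=
      (hlev _).mpr ⟨q, ⟨hqne, hqnodup, hqkeys, hchq⟩, hqh, hqlen,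
        List.getLast?_eq_some_getLast hqne, rfl⟩
    refine ⟨_, hstmem, w, ⟨hwadj, (PySem.Dict.contains_iff_mem_keys d w).mpr hwkeys, ?_⟩, ?_⟩
    · have hnot : w ∉ PySem.List.sorted q (fun x => x) false := fun hc =>
        hwq ((PySem.List.sorted_perm q (fun x => x) false).mem_iff.mp hc)
      simpa using hnot
    · have h1 : PySem.List.sorted (PySem.List.sorted q (fun x => x) false ++ [w])
          (fun x => x) false = PySem.List.sorted (q ++ [w]) (fun x => x) false :=
        PySem.List.sorted_eq_sorted_of_perm _ _ _ (fun _ _ h => h)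
          ((PySem.List.sorted_perm q (fun x => x) false).append_right [w])
      rw [Prod.ext_iff]
      refine ⟨?_, hsv.symm⟩
      show PySem.List.sorted (PySem.List.sorted q (fun x => x) false ++ [w])
          (fun x => x) false = s.1
      rw [h1, hvis, hq]

theorem pv_loop_inv (d : PySem.Dict Int (List Int)) (u v need : Int)
    (hu : u ∈ d.keys) (hno : ¬(u = v ∧ need ≤ 1)) :
    ∀ m : Nat,
      ((((PySem.List.pyRange 2 (2 + (m : Int)) 1).foldl (pvStep d v need)
          (false, PySem.Set.ofList [([u], u)])).1 = true ↔ pvW d u v need (1 + m)) ∧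
      ((((PySem.List.pyRange 2 (2 + (m : Int)) 1).foldl (pvStep d v need)
          (false, PySem.Set.ofList [([u], u)])).1 = false) →
        ∀ s, s ∈ ((PySem.List.pyRange 2 (2 + (m : Int)) 1).foldl (pvStep d v need)
          (false, PySem.Set.ofList [([u], u)])).2 ↔ pvState d u (1 + m) s)) := by
  intro m
  induction m with
  | zero =>
    simp only [Nat.cast_zero, add_zero]
    rw [PySem.List.pyRange_one_eq_nil (le_refl 2)]
    simp only [List.foldl_nil]
    have hW1 : ¬ pvW d u v need 1 := by
      rintro ⟨p, ⟨hne, -, -, -⟩, hh, hlast, hneedle, hlen⟩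
      rcases p with _ | ⟨x, t⟩
      · exact hne rfl
      rcases t with _ | ⟨y, t2⟩
      · simp only [List.head?_cons, Option.some.injEq] at hh
        simp only [List.getLast?_singleton, Option.some.injEq] at hlast
        simp only [List.length_cons, List.length_nil] at hneedle
        refine hno ⟨?_, ?_⟩
        · rw [← hh, ← hlast]
        · exact_mod_cast hneedle
      · have h2 : 2 ≤ (x :: y :: t2).length := by simp
        omega
    refine ⟨by simp [hW1], fun _ s => ?_⟩
    rw [PySem.Set.mem_ofList]
    simp only [List.mem_singleton]
    constructor
    · rintro rfl
      exact ⟨[u], ⟨by simp, by simp, by simpa using hu, List.isChain_singleton u⟩,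
        rfl, rfl, rfl, rfl⟩
    · rintro ⟨p, ⟨hne, -, -, -⟩, hh, hlen, hlast, hvis⟩
      rcases p with _ | ⟨x, t⟩
      · exact absurd rfl hne
      rcases t with _ | ⟨y, t2⟩
      · simp only [List.head?_cons, Option.some.injEq] at hh
        subst hh
        simp only [List.getLast?_singleton, Option.some.injEq] at hlast
        have hs1 : s.1 = [x] := by
          rw [hvis]; rfl
        rw [Prod.ext_iff]
        exact ⟨hs1, hlast.symm⟩
      · simp at hlen
  | succ m ih =>
    rw [show (2 + ((m + 1 : Nat) : Int)) = (2 + (m : Int)) + 1 by push_cast; ring]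
    rw [PySem.List.pyRange_one_succ_right (by omega : (2 : Int) ≤ 2 + (m : Int))]
    rw [List.foldl_append]
    simp only [List.foldl_cons, List.foldl_nil]
    set R := (PySem.List.pyRange 2 (2 + (m : Int)) 1).foldl (pvStep d v need)
      (false, PySem.Set.ofList [([u], u)]) with hR
    obtain ⟨ih1, ih2⟩ := ih
    cases hb : R.1 with
    | false =>
      have hlevel := ih2 hb
      have hnext := pv_mem_pvNext d u (1 + m) (by omega) R.2 hlevel
      by_cases hcond : (decide (need ≤ 2 + (m : Int)) &&
          (pvNext d R.2).any (fun q => q.2 == v)) = true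
      · rw [show pvStep d v need R (2 + (m : Int)) = (true, pvNext d R.2) from by
          simp [pvStep, hb, hcond]]
        refine ⟨⟨fun _ => ?_, fun _ => rfl⟩, fun h => absurd h (by simp)⟩
        rw [Bool.and_eq_true] at hcond
        obtain ⟨hneedk, hany⟩ := hcond
        rw [decide_eq_true_eq] at hneedk
        obtain ⟨sW, hsmem, hsv⟩ := List.any_eq_true.mp hany
        rw [beq_iff_eq] at hsv
        obtain ⟨p, hpath, hh, hlen, hlast, -⟩ := (hnext sW).mp hsmem
        refine ⟨p, hpath, hh, by rw [hlast, hsv], ?_, by omega⟩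
        rw [hlen]
        push_cast
        omega
      · rw [show pvStep d v need R (2 + (m : Int)) = (false, pvNext d R.2) from by
          simp [pvStep, hb, hcond]]
        refine ⟨⟨fun h => absurd h (by simp), fun hW => ?_⟩, fun _ => hnext⟩
        exfalso
        have hWm : ¬ pvW d u v need (1 + m) := fun hW' => by simp [ih1.mpr hW'] at hb
        obtain ⟨p, hpath, hh, hlast, hneedle, hlen⟩ := hW
        have hplen : p.length = 1 + (m + 1) := by
          by_contra hcon
          exact hWm ⟨p, hpath, hh, hlast, hneedle, by omega⟩
        apply hcond
        rw [Bool.and_eq_true]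
        refine ⟨decide_eq_true ?_,
          List.any_eq_true.mpr ⟨(PySem.List.sorted p (fun x => x) false, v), ?_, by simp⟩⟩
        · have hne2 := hneedle
          rw [hplen] at hne2
          push_cast at hne2
          omega
        · exact (hnext _).mpr ⟨p, hpath, hh, by omega, hlast, rfl⟩
    | true =>
      rw [show pvStep d v need R (2 + (m : Int)) = R from by simp [pvStep, hb]]
      obtain ⟨p, hpath, hh, hlast, hneedle, hlen⟩ := ih1.mp hb
      exact ⟨⟨fun _ => ⟨p, hpath, hh, hlast, hneedle, by omega⟩, fun _ => hb⟩,
        fun h => absurd h (by simp [hb])⟩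

theorem pvB_iff (G : List (Int × List Int)) (u v l : Int) (hl : 1 ≤ l) :
    long_and_simple_decision_alt G u v l = true ↔ pvPathEx (PySem.Dict.ofList G) u v l := by
  simp only [long_and_simple_decision_alt]
  rw [if_neg (by omega : ¬ l = 0)]
  by_cases hu : PySem.Dict.contains (PySem.Dict.ofList G) u = true
  case neg =>
    rw [if_pos (by simp [Bool.not_eq_true] at hu ⊢; simp [hu])]
    constructor
    · intro h; exact absurd h (by simp)
    · intro hP
      exfalso
      obtain ⟨p, ⟨hne, -, hkeys, -⟩, hh, -, -⟩ := hP
      obtain ⟨t, rfl⟩ := List.head?_eq_some_iff.mp hh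
      exact hu ((PySem.Dict.contains_iff_mem_keys _ _).mpr (hkeys u List.mem_cons_self))
  case pos =>
  by_cases hv : PySem.Dict.contains (PySem.Dict.ofList G) v = true
  case neg =>
    rw [if_pos (by simp [Bool.not_eq_true] at hv ⊢; simp [hv])]
    constructor
    · intro h; exact absurd h (by simp)
    · intro hP
      exfalso
      obtain ⟨p, ⟨hne, -, hkeys, -⟩, -, hlast, -⟩ := hP
      obtain ⟨ys, rfl⟩ := List.getLast?_eq_some_iff.mp hlast
      exact hv ((PySem.Dict.contains_iff_mem_keys _ _).mpr (hkeys v (by simp)))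
  case pos =>
  rw [if_neg (by simp [hu, hv])]
  by_cases heq : u = v ∧ (1 : Int) ≥ max l 1
  · rw [if_pos heq]
    constructor
    · intro _
      obtain ⟨rfl, h1⟩ := heq
      have hl1 : l ≤ 1 := le_trans (le_max_left l 1) h1
      refine ⟨[u], ⟨by simp, by simp, ?_, List.isChain_singleton u⟩, rfl, rfl, ?_⟩
      · simpa using (PySem.Dict.contains_iff_mem_keys _ _).mp hu
      · simpa using hl1
    · intro _; rfl
  · rw [if_neg heq]
    have hukeys : u ∈ (PySem.Dict.ofList G).keys := (PySem.Dict.contains_iff_mem_keys _ _).mp hu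
    have hno : ¬(u = v ∧ max l 1 ≤ 1) := by
      intro h
      exact heq ⟨h.1, h.2⟩
    have hn1 : 1 ≤ (PySem.Dict.ofList G).keys.length :=
      List.length_pos_iff.mpr (List.ne_nil_of_mem hukeys)
    obtain ⟨inv1, -⟩ := pv_loop_inv (PySem.Dict.ofList G) u v (max l 1) hukeys hno
      ((PySem.Dict.ofList G).keys.length - 1)
    have hsz : PySem.Dict.size (PySem.Dict.ofList G) = (PySem.Dict.ofList G).keys.length := by
      simp [PySem.Dict.size, PySem.Dict.keys]
    have hbound : (2 + ((((PySem.Dict.ofList G).keys.length - 1 : Nat)) : Int)) =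
        ((PySem.Dict.size (PySem.Dict.ofList G) : Nat) : Int) + 1 := by
      rw [hsz]; omega
    rw [← hbound, inv1,
      show 1 + ((PySem.Dict.ofList G).keys.length - 1) = (PySem.Dict.ofList G).keys.length
        from by omega]
    constructor
    · rintro ⟨p, hpath, hh, hlast, hneedle, -⟩
      exact ⟨p, hpath, hh, hlast, le_trans (le_max_left l 1) hneedle⟩
    · rintro ⟨p, hpath, hh, hlast, hlen⟩
      have hsub : p.Subperm (PySem.Dict.ofList G).keys := hpath.2.1.subperm hpath.2.2.1
      refine ⟨p, hpath, hh, hlast, max_le hlen (le_trans hl hlen), ?_⟩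
      have := hsub.length_le
      omega

-- ===== VERDICT (by name: the statement is the Claim_ definition above) =====
theorem long_and_simple_decision_spec : Claim_equal_long_and_simple_decision := by
  intro G u v l _hdom hpre
  unfold Spec_long_and_simple_decision
  rcases hpre with ⟨hl0, _⟩
  by_cases h0 : l = 0
  · simp [long_and_simple_decision, long_and_simple_decision_alt, h0]
  · have hl : 1 ≤ l := by omega
    exact Bool.eq_iff_iff.mpr ((pvA_iff G u v l hl).trans (pvB_iff G u v l hl).symm)
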